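-- pv_equiv track=rewrite | github.com/Apress/practical-data-science-with-python-3 | ch3/optimization/elevator1.py | num_days
-- ===== SOURCE A (Python) =====
-- def num_days(h, u, d):
--     total_days = 1
--     height_left = h
--
--     while u < height_left:
--         days = height_left // u
--         total_days += days
--         height_left -= days * (u - d)
--     return total_days
-- ===== SOURCE B (Python) =====
-- def num_days(h, u, d):
--     # Closed form: day 1 reaches height u; every further day gains u - d,
--     # so ceil((h - u) / (u - d)) more days are needed, written with floor division.
--     if h <= u:
--         return 1
--     return 1 + (h - d - 1) // (u - d)
-- ===== Notes on version B (the rewrite author's own statement) =====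
-- stated objective: simpler
-- what changed: B replaces A's batched floor-division loop by the closed form 1 + ceil((h-u)/(u-d)) (one floor division), which also fixes A's off-by-one when d == 0 and u divides h.
-- intended difference: When d == 0, u < h and u divides h, A returns h/u + 1 but B returns h/u, the intended day count: the worm reaches the top exactly at the end of day h/u, yet A's batch unconditionally counts one extra day. — e.g. on num_days(10, 5, 0): A returns 3, B returns 2
-- outside the precondition, e.g. on num_days(12, 5, -5): A returns 3, B returns 2; on num_days(5, -2, 3): A returns -2, B returns 0
import Mathlib
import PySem

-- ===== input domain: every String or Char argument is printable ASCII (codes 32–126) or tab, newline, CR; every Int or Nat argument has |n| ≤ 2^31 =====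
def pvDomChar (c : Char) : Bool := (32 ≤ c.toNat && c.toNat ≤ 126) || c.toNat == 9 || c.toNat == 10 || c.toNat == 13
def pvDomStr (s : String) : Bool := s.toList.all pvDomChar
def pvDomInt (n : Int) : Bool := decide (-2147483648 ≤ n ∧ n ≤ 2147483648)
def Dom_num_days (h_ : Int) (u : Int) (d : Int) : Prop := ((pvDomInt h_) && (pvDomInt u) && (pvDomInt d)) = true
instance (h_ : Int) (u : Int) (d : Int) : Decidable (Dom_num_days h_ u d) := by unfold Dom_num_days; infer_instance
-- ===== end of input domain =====

-- B replaces A's batched `height_left // u` loop by a closed form: one floor division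
-- (simpler, and correct on the exact-multiple corner where A counts one day too many).

-- ===== PORT A =====
-- A's while loop; the fuel argument only makes the recursion total (it is not part of A's
-- algorithm): on every input admitted by Pre_ the loop stops before the fuel runs out.
def numDaysLoopA (u : Int) (d : Int) : Nat → Int → Int → Int
  | 0, _, total => total
  | fuel + 1, left, total =>
    if u < left then
      let days := PySem.Int.floordiv left u
      numDaysLoopA u d fuel (left - days * (u - d)) (total + days)
    else total

def num_days (h_ : Int) (u : Int) (d : Int) : Int :=
  numDaysLoopA u d ((h_ - u).toNat + 1) h_ 1

-- ===== PORT B =====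
def num_days_alt (h_ : Int) (u : Int) (d : Int) : Int :=
  if h_ ≤ u then 1
  else 1 + PySem.Int.floordiv (h_ - d - 1) (u - d)

-- ===== PRECONDITION & SPEC =====
-- Pre_ keeps the worm problem's natural domain: either the worm tops out on day one (h ≤ u),
-- or the overnight slide satisfies 0 ≤ d < u; outside it A raises ZeroDivisionError (u = 0 < h),
-- loops forever (0 < u ≤ d < h and most u < 0 cases), or returns a batched count for a
-- negative slide/negative climb that is outside the problem's meaning.
def Pre_num_days (h_ : Int) (u : Int) (d : Int) : Prop :=
  h_ ≤ u ∨ (0 ≤ d ∧ d < u)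
instance (h_ : Int) (u : Int) (d : Int) : Decidable (Pre_num_days h_ u d) := by
  unfold Pre_num_days; infer_instance

def pvWitness_num_days : Int × Int × Int := (10, 3, 1)

-- When d = 0, u < h and u divides h, A returns h/u + 1 but B returns h/u, the intended day
-- count: the worm reaches the top exactly at the end of day h/u, yet A's batch counts one extra day.
def D_num_days (h_ : Int) (u : Int) (d : Int) : Prop :=
  d = 0 ∧ u < h_ ∧ u ∣ h_
instance (h_ : Int) (u : Int) (d : Int) : Decidable (D_num_days h_ u d) := by
  unfold D_num_days; infer_instance

def Spec_num_days (h_ : Int) (u : Int) (d : Int) (out : Int) : Prop :=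
  ¬ D_num_days h_ u d → out = num_days_alt h_ u d
instance (h_ : Int) (u : Int) (d : Int) (out : Int) : Decidable (Spec_num_days h_ u d out) := by
  unfold Spec_num_days; infer_instance

def pvDiffWitness_num_days : Int × Int × Int := (10, 5, 0)
def pvDiffWitnessOut_num_days : Int × Int := (3, 2)

-- ===== CLAIM (what is proved, stated in full; the proofs are below) =====
def Claim_unchanged_num_days : Prop := ∀ (h_ : Int) (u : Int) (d : Int), Dom_num_days h_ u d → Pre_num_days h_ u d → Spec_num_days h_ u d (num_days h_ u d)
def Claim_changed_num_days : Prop := Dom_num_days (pvDiffWitness_num_days.1) (pvDiffWitness_num_days.2.1) (pvDiffWitness_num_days.2.2) ∧ Pre_num_days (pvDiffWitness_num_days.1) (pvDiffWitness_num_days.2.1) (pvDiffWitness_num_days.2.2) ∧ D_num_days (pvDiffWitness_num_days.1) (pvDiffWitness_num_days.2.1) (pvDiffWitness_num_days.2.2) ∧ num_days (pvDiffWitness_num_days.1) (pvDiffWitness_num_days.2.1) (pvDiffWitness_num_days.2.2) = pvDiffWitnessOut_num_days.1 ∧ num_days_alt (pvDiffWitness_num_days.1) (pvDiffWitness_num_days.2.1)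 (pvDiffWitness_num_days.2.2) = pvDiffWitnessOut_num_days.2 ∧ pvDiffWitnessOut_num_days.1 ≠ pvDiffWitnessOut_num_days.2
def Claim_exact_num_days : Prop := ∀ (h_ : Int) (u : Int) (d : Int), Dom_num_days h_ u d → Pre_num_days h_ u d → D_num_days h_ u d → num_days h_ u d ≠ num_days_alt h_ u d

-- ===== LEMMAS AND PROOFS =====

theorem loopA_stop (u d : Int) (f : Nat) (left total : Int) (h : ¬ u < left) :
    numDaysLoopA u d f left total = total := by
  cases f <;> simp [numDaysLoopA, h]

-- floor-division shift: floordiv (x - k*c) c = floordiv x c - k for 0 < c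
theorem floordiv_sub_mul (x k c : Int) (hc : 0 < c) :
    PySem.Int.floordiv (x - k * c) c = PySem.Int.floordiv x c - k := by
  have hq := (PySem.Int.floordiv_eq_iff_of_pos (a := x) (b := c) (q := PySem.Int.floordiv x c) hc).mp rfl
  rw [PySem.Int.floordiv_eq_iff_of_pos hc]
  constructor <;> nlinarith [hq.1, hq.2]

-- A's loop computes total + ceil((left-u)/(u-d)) when 0 < d < u, u < left and the fuel suffices
theorem loopA_closed (u d : Int) (hd : 0 < d) (hdu : d < u) :
    ∀ (f : Nat) (left total : Int), u < left → (left - u).toNat ≤ f →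
      numDaysLoopA u d f left total
        = total + PySem.Int.floordiv (left - u + (u - d) - 1) (u - d) := by
  intro f
  induction f with
  | zero => intro left total hl hf; omega
  | succ n ih =>
    intro left total hl hf
    simp only [numDaysLoopA, if_pos hl]
    have hu : (0 : Int) < u := by omega
    have hc : (0 : Int) < u - d := by omega
    have hq := (PySem.Int.floordiv_eq_iff_of_pos (a := left) (b := u)
      (q := PySem.Int.floordiv left u) hu).mp rfl
    set days := PySem.Int.floordiv left u with hdays
    have hdays1 : 1 ≤ days := by nlinarith [hq.1, hq.2]
    have hdc : 1 ≤ days * (u - d) := by nlinarith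
    have hshift := floordiv_sub_mul (left - u + (u - d) - 1) days (u - d) hc
    by_cases hl' : u < left - days * (u - d)
    · rw [ih (left - days * (u - d)) (total + days) hl' (by omega)]
      rw [show left - days * (u - d) - u + (u - d) - 1
            = left - u + (u - d) - 1 - days * (u - d) by ring, hshift]
      ring
    · rw [loopA_stop u d n _ _ hl']
      -- here days = ceil((left-u)/(u-d))
      have hlow : u < left - (days - 1) * (u - d) := by nlinarith [hq.1]
      have h1 : PySem.Int.floordiv (left - u + (u - d) - 1) (u - d) = days := by
        rw [PySem.Int.floordiv_eq_iff_of_pos hc]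
        constructor <;> nlinarith
      omega

-- ===== VERDICT (by name: the statement is the Claim_ definition above) =====
theorem num_days_spec : Claim_unchanged_num_days := by
  intro h_ u d _ hpre hnd
  unfold num_days num_days_alt
  by_cases hl : u < h_
  · rw [if_neg (by omega)]
    have hdu : 0 ≤ d ∧ d < u := by
      rcases hpre with h | h
      · omega
      · exact h
    by_cases hd : 0 < d
    · rw [loopA_closed u d hd hdu.2 _ h_ 1 hl (by omega),
        show h_ - u + (u - d) - 1 = h_ - d - 1 by ring]
    · -- d = 0: A's loop makes exactly one batched iteration
      have hd0 : d = 0 := by omega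
      subst hd0
      have hu : (0 : Int) < u := by omega
      simp only [numDaysLoopA, if_pos hl]
      have hq := (PySem.Int.floordiv_eq_iff_of_pos (a := h_) (b := u)
        (q := PySem.Int.floordiv h_ u) hu).mp rfl
      set days := PySem.Int.floordiv h_ u with hdays
      have hstop : ¬ u < h_ - days * (u - 0) := by nlinarith [hq.2]
      rw [loopA_stop u 0 _ _ _ hstop]
      -- B's value: floordiv (h_ - 1) u = days since u does not divide h_
      have hndvd : ¬ u ∣ h_ := fun hdvd => (hnd ⟨rfl, hl, hdvd⟩).elim
      have hne : h_ ≠ days * u := by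
        intro he; exact hndvd ⟨days, by linarith [he]⟩
      have h1 : PySem.Int.floordiv (h_ - 0 - 1) (u - 0) = days := by
        rw [show h_ - 0 - 1 = h_ - 1 by ring, show u - 0 = u by ring,
          PySem.Int.floordiv_eq_iff_of_pos hu]
        have hlt : days * u < h_ := lt_of_le_of_ne hq.1 (fun he => hne he.symm)
        constructor <;> nlinarith [hq.2, hlt]
      omega
  · rw [loopA_stop u d _ _ _ hl, if_pos (by omega)]

theorem num_days_changed : Claim_changed_num_days := by
  unfold Claim_changed_num_days; decide

theorem num_days_tight : Claim_exact_num_days := by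
  intro h_ u d _ hpre hD
  obtain ⟨hd0, hl, q, hq⟩ := hD
  subst hd0
  have hu : (0 : Int) < u := by
    rcases hpre with h | h <;> omega
  unfold num_days num_days_alt
  rw [if_neg (by omega)]
  have hdays : PySem.Int.floordiv h_ u = q := by
    rw [PySem.Int.floordiv_eq_iff_of_pos hu]
    constructor <;> nlinarith [hq]
  -- A: one batched iteration, returns 1 + q
  have hA : numDaysLoopA u 0 ((h_ - u).toNat + 1) h_ 1 = 1 + q := by
    simp only [numDaysLoopA, if_pos hl, hdays]
    have hstop : ¬ u < h_ - q * (u - 0) := by nlinarith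
    rw [loopA_stop u 0 _ _ _ hstop]
  -- B: returns 1 + (q - 1) = q
  have hB : PySem.Int.floordiv (h_ - 0 - 1) (u - 0) = q - 1 := by
    rw [show h_ - 0 - 1 = h_ - 1 by ring, show u - 0 = u by ring,
      PySem.Int.floordiv_eq_iff_of_pos hu]
    constructor <;> nlinarith [hq]
  rw [hA, hB]; omega
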